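-- pv_equiv track=rewrite | github.com/every-algorithm/python | networking/intersection_algorithm.py | select_agreement_sources
-- ===== SOURCE A (Python) =====
-- def select_agreement_sources(time_sources, tolerance):
--     """
--     time_sources: list of tuples (source_id, timestamp)
--     tolerance: maximum allowed difference between agreeing timestamps
--     Returns a list of source_ids that are in the largest agreeing group.
--     """
--     # Count how many other sources are within tolerance of each source
--     agreement_counts = {}
--     for i, (id_i, time_i) in enumerate(time_sources):
--         count = 0
--         for j, (id_j, time_j) in enumerate(time_sources):
--             if i == j:
--                 continue
--             if abs(time_i - time_j) <= tolerance:
--                 count += 1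
--         agreement_counts[id_i] = count
--
--     # Find the maximum count
--     max_count = max(agreement_counts.values())
--     agreeing_sources = [id_ for id_, count in agreement_counts.items() if count == max_count]
--     return agreeing_sources
-- ===== SOURCE B (Python) =====
-- def _bisect(a, x, upper):
--     """First index i in sorted a with a[i] > x (upper) resp. a[i] >= x (not upper)."""
--     lo, hi = 0, len(a)
--     while lo < hi:
--         mid = (lo + hi) // 2
--         if a[mid] < x or (upper and a[mid] == x):
--             lo = mid + 1
--         else:
--             hi = mid
--     return lo
--
--
-- def select_agreement_sources(time_sources, tolerance):
--     if tolerance < 0: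
--         # no timestamp is within a negative tolerance of anything, even itself:
--         # every source's agreement count is 0, so all sources tie
--         return list(dict.fromkeys(sid for sid, _ in time_sources))
--     ts = sorted(t for _, t in time_sources)
--     window = {}
--     for sid, t in time_sources:
--         # number of timestamps (including this source's own) within tolerance of t
--         window[sid] = _bisect(ts, t + tolerance, True) - _bisect(ts, t - tolerance, False)
--     best = max(window.values())
--     return [sid for sid, c in window.items() if c == best]
-- ===== Notes on version B (the rewrite author's own statement) =====
-- stated objective: faster
-- what changed: replaces the all-pairs O(n^2) tolerance scan with sorting the timestamps once and a binary-search window count per source (and a direct all-tie answer for negative tolerance); the uniform self-count shift cannot change which sources attain the maximum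
import Mathlib
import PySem

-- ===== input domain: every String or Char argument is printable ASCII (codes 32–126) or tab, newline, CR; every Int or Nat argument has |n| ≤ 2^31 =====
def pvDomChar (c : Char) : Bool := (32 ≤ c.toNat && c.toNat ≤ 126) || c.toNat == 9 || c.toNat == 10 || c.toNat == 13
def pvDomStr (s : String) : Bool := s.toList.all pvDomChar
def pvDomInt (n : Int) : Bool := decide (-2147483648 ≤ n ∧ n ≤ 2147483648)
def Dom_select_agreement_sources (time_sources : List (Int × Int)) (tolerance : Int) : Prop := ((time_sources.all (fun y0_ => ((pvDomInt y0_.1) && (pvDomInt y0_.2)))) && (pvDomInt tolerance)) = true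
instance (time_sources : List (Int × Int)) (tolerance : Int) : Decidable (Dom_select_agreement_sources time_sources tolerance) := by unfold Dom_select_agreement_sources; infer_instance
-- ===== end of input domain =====

-- B replaces A's all-pairs O(n^2) tolerance scan by sorting the timestamps once and counting each
-- source's agreement window with a binary search (objective: faster; Pre_ excludes the empty list,
-- on which Python A raises ValueError).


-- ===== PORT A =====
def select_agreement_sources (time_sources : List (Int × Int)) (tolerance : Int) : List Int :=
  let agreement_counts : PySem.Dict Int Int :=
    (PySem.List.enumerate time_sources 0).foldl (fun d p =>
      let count : Int := (PySem.List.enumerate time_sources 0).foldl (fun c q =>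
        if q.1 = p.1 then c
        else if |p.2.2 - q.2.2| ≤ tolerance then c + 1 else c) 0
      d.insert p.2.1 count) PySem.Dict.empty
  match PySem.List.max? (PySem.Dict.values agreement_counts) (fun v => v) with
  | none => []  -- Python raises ValueError here (max of an empty sequence); excluded by Pre_
  | some max_count =>
      ((PySem.Dict.items agreement_counts).filter (fun kv => decide (kv.2 = max_count))).map Prod.fst

-- ===== PORT B =====
-- the 'while lo < hi' loop of Source B's _bisect, with a fuel argument (hi - lo shrinks every
-- iteration, so a.length steps always suffice: the fuel only makes the recursion structural);
-- a[mid] never raises there (0 ≤ lo ≤ mid < hi ≤ len), so the 'none' arm of pyGet? is unreachable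
def pvBisectLoop (a : List Int) (x : Int) (upper : Bool) : Nat → Int → Int → Int
  | 0, lo, _ => lo
  | fuel + 1, lo, hi =>
    if lo < hi then
      match PySem.List.pyGet? a (PySem.Int.floordiv (lo + hi) 2) with
      | none => lo
      | some v =>
        if v < x ∨ (upper = true ∧ v = x) then
          pvBisectLoop a x upper fuel (PySem.Int.floordiv (lo + hi) 2 + 1) hi
        else
          pvBisectLoop a x upper fuel lo (PySem.Int.floordiv (lo + hi) 2)
    else lo

def pvBisect (a : List Int) (x : Int) (upper : Bool) : Int :=
  pvBisectLoop a x upper a.length 0 (a.length : Int)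

def select_agreement_sources_alt (time_sources : List (Int × Int)) (tolerance : Int) : List Int :=
  if tolerance < 0 then
    PySem.List.dedup (time_sources.map Prod.fst)
  else
    let ts := PySem.List.sorted (time_sources.map Prod.snd) (fun t => t) false
    let window : PySem.Dict Int Int := time_sources.foldl (fun d p =>
      d.insert p.1 (pvBisect ts (p.2 + tolerance) true - pvBisect ts (p.2 - tolerance) false))
      PySem.Dict.empty
    match PySem.List.max? (PySem.Dict.values window) (fun v => v) with
    | none => []
    | some best =>
        ((PySem.Dict.items window).filter (fun kv => decide (kv.2 = best))).map Prod.fst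

-- ===== PRECONDITION & SPEC =====
-- Pre_ excludes exactly the empty list, on which Python A raises ValueError (max() of an empty sequence).
def Pre_select_agreement_sources (time_sources : List (Int × Int)) (tolerance : Int) : Prop :=
  time_sources ≠ []
instance (time_sources : List (Int × Int)) (tolerance : Int) : Decidable (Pre_select_agreement_sources time_sources tolerance) := by unfold Pre_select_agreement_sources; infer_instance

def pvWitness_select_agreement_sources : (List (Int × Int)) × Int := ([(1, 0), (2, 5)], 3)

def Spec_select_agreement_sources (time_sources : List (Int × Int)) (tolerance : Int) (out : List Int) : Prop := out = select_agreement_sources_alt time_sources tolerance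
instance (time_sources : List (Int × Int)) (tolerance : Int) (out : List Int) : Decidable (Spec_select_agreement_sources time_sources tolerance out) := by unfold Spec_select_agreement_sources; infer_instance

-- ===== CLAIM (what is proved, stated in full; the proofs are below) =====
def Claim_equal_select_agreement_sources : Prop := ∀ (time_sources : List (Int × Int)) (tolerance : Int), Dom_select_agreement_sources time_sources tolerance → Pre_select_agreement_sources time_sources tolerance → Spec_select_agreement_sources time_sources tolerance (select_agreement_sources time_sources tolerance)

-- ===== LEMMAS AND PROOFS =====

-- counting a conjunction with a negated side
lemma pv_countP_and_not (l : List α) (p q : α → Bool) :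
    (l.countP (fun a => p a && !q a) : Int)
      = (l.countP p : Int) - (l.countP (fun a => p a && q a) : Int) := by
  induction l with
  | nil => simp
  | cons a t ih =>
    rw [List.countP_cons, List.countP_cons, List.countP_cons]
    cases hp : p a <;> cases hq : q a <;> simp only [hp, hq, Bool.and_true, Bool.and_false,
      Bool.not_true, Bool.not_false, if_true, if_false] <;> push_cast <;> omega

-- exactly one element of a fst-Nodup pair list has a given first component
lemma pv_countP_fst_eq {β : Type} (l : List (Int × β)) (i : Int) (x : β) (P : β → Bool)
    (hnd : (l.map Prod.fst).Nodup) (hmem : (i, x) ∈ l) :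
    l.countP (fun q => decide (q.1 = i) && P q.2) = if P x then 1 else 0 := by
  induction l with
  | nil => cases hmem
  | cons a t ih =>
    rw [List.countP_cons]
    rw [List.map_cons, List.nodup_cons] at hnd
    rcases List.mem_cons.mp hmem with heq | hmem'
    · subst heq
      have hzero : t.countP (fun q => decide (q.1 = i) && P q.2) = 0 := by
        rw [List.countP_eq_zero]
        intro q hq
        simp only [Bool.and_eq_true, decide_eq_true_eq, not_and]
        intro h1 _
        exact hnd.1 (List.mem_map.mpr ⟨q, hq, h1⟩)
      rw [hzero]
      cases hPx : P x <;> simp [hPx]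
    · have hne : ¬(a.1 = i) := by
        intro h1
        apply hnd.1
        rw [h1]
        exact List.mem_map.mpr ⟨(i, x), hmem', rfl⟩
      simp only [hne, decide_false, Bool.false_and, if_false, Nat.add_zero]
      exact ih hnd.2 hmem'

-- the inner loop of A counts, for the entry at index i, all other entries within tolerance;
-- that is the full window count minus the self term (1 iff 0 ≤ tolerance)
lemma pv_inner_loop (time_sources : List (Int × Int)) (tolerance : Int)
    (p : Int × (Int × Int)) (hp : p ∈ PySem.List.enumerate time_sources 0) :
    (PySem.List.enumerate time_sources 0).foldl (fun c q =>
        if q.1 = p.1 then c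
        else if |p.2.2 - q.2.2| ≤ tolerance then c + 1 else c) (0 : Int)
      = ((time_sources.map Prod.snd).countP (fun u => decide (|p.2.2 - u| ≤ tolerance)) : Int)
        - (if 0 ≤ tolerance then 1 else 0) := by
  have hbody : (PySem.List.enumerate time_sources 0).foldl (fun c q =>
        if q.1 = p.1 then c
        else if |p.2.2 - q.2.2| ≤ tolerance then c + 1 else c) (0 : Int)
      = (PySem.List.enumerate time_sources 0).foldl (fun c q =>
        if (decide (|p.2.2 - q.2.2| ≤ tolerance) && !decide (q.1 = p.1)) = true then c + 1 else c) (0 : Int) := by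
    apply PySem.List.foldl_congr_mem
    intro acc q _
    by_cases h1 : q.1 = p.1 <;> by_cases h2 : |p.2.2 - q.2.2| ≤ tolerance <;> simp [h1, h2]
  rw [hbody, PySem.List.foldl_if_add_one, pv_countP_and_not, zero_add]
  have hfst : ((PySem.List.enumerate time_sources 0).map Prod.fst).Nodup := by
    rw [PySem.List.map_fst_enumerate]
    exact PySem.List.nodup_pyRange_one 0 (0 + time_sources.length)
  have hone : (PySem.List.enumerate time_sources 0).countP
      (fun q => decide (|p.2.2 - q.2.2| ≤ tolerance) && decide (q.1 = p.1))
      = if 0 ≤ tolerance then 1 else 0 := by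
    have hcomm : (PySem.List.enumerate time_sources 0).countP
        (fun q => decide (|p.2.2 - q.2.2| ≤ tolerance) && decide (q.1 = p.1))
        = (PySem.List.enumerate time_sources 0).countP
          (fun q => decide (q.1 = p.1) && decide (|p.2.2 - q.2.2| ≤ tolerance)) := by
      apply List.countP_congr
      intro q _
      rw [Bool.and_comm]
    rw [hcomm]
    have h3 := pv_countP_fst_eq (PySem.List.enumerate time_sources 0) p.1 p.2
      (fun r : Int × Int => decide (|p.2.2 - r.2| ≤ tolerance)) hfst hp
    refine h3.trans ?_
    by_cases ht : 0 ≤ tolerance <;> simp [ht]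
  have hwin : (PySem.List.enumerate time_sources 0).countP
      (fun q => decide (|p.2.2 - q.2.2| ≤ tolerance))
      = (time_sources.map Prod.snd).countP (fun u => decide (|p.2.2 - u| ≤ tolerance)) := by
    have hmap : (PySem.List.enumerate time_sources 0).map (fun q : Int × (Int × Int) => q.2.2)
        = time_sources.map Prod.snd := by
      rw [show (fun q : Int × (Int × Int) => q.2.2) = (Prod.snd ∘ Prod.snd) from rfl,
        ← List.map_map, PySem.List.map_snd_enumerate]
    have h2 := List.countP_map (p := fun u : Int => decide (|p.2.2 - u| ≤ tolerance))
      (f := fun q : Int × (Int × Int) => q.2.2) (l := PySem.List.enumerate time_sources 0)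
    rw [hmap] at h2
    exact h2.symm
  rw [hone, hwin]
  by_cases ht : 0 ≤ tolerance <;> simp [ht]

lemma pv_sorted_getElem_le (a : List Int) (hs : a.Pairwise (· ≤ ·)) (j k : Nat)
    (hk : k < a.length) (hjk : j ≤ k) : a[j]'(by omega) ≤ a[k] := by
  rcases Nat.lt_or_ge j k with h | h
  · exact List.pairwise_iff_getElem.mp hs j k (by omega) hk h
  · have : j = k := by omega
    subst this
    exact le_refl _

lemma pv_pred_anti (x : Int) (upper : Bool) (u v : Int) (huv : u ≤ v)
    (h : v < x ∨ (upper = true ∧ v = x)) : u < x ∨ (upper = true ∧ u = x) := by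
  rcases h with h | ⟨hu, he⟩
  · exact Or.inl (by omega)
  · rcases lt_or_eq_of_le (le_trans huv (le_of_eq he)) with h' | h'
    · exact Or.inl h'
    · exact Or.inr ⟨hu, h'⟩

lemma pv_countP_sorted_split (a : List Int) (P : Int → Bool) (n : Nat) (hn : n ≤ a.length)
    (hlow : ∀ (k : Nat) (hk : k < a.length), k < n → P a[k] = true)
    (hhigh : ∀ (k : Nat) (hk : k < a.length), n ≤ k → P a[k] = false) :
    a.countP P = n := by
  conv_lhs => rw [← List.take_append_drop n a]
  rw [List.countP_append]
  have h1 : (a.take n).countP P = n := by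
    rw [List.countP_eq_length.mpr, List.length_take, Nat.min_eq_left hn]
    intro u hu
    obtain ⟨k, hk, rfl⟩ := List.mem_iff_getElem.mp hu
    rw [List.getElem_take]
    apply hlow
    simp only [List.length_take] at hk
    omega
  have h2 : (a.drop n).countP P = 0 := by
    rw [List.countP_eq_zero]
    intro u hu
    obtain ⟨k, hk, rfl⟩ := List.mem_iff_getElem.mp hu
    rw [List.getElem_drop]
    simp only [List.length_drop] at hk
    simp [hhigh (n + k) (by omega) (by omega)]
  omega

-- the value returned when the loop has converged (lo = hi)
lemma pv_bisect_count_at (a : List Int) (x : Int) (upper : Bool) (lo : Int)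
    (hlo : 0 ≤ lo) (hhi : lo ≤ (a.length : Int))
    (hbelow : ∀ (k : Nat) (hk : k < a.length), k < lo.toNat → (a[k] < x ∨ (upper = true ∧ a[k] = x)))
    (habove : ∀ (k : Nat) (hk : k < a.length), lo.toNat ≤ k → ¬(a[k] < x ∨ (upper = true ∧ a[k] = x))) :
    lo = (a.countP (fun u => decide (u < x ∨ (upper = true ∧ u = x))) : Int) := by
  have hcount : a.countP (fun u => decide (u < x ∨ (upper = true ∧ u = x))) = lo.toNat := by
    apply pv_countP_sorted_split a _ lo.toNat (by omega)
    · intro k hk hklt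
      exact decide_eq_true (hbelow k hk hklt)
    · intro k hk hkge
      exact decide_eq_false (habove k hk hkge)
  rw [hcount]
  omega

-- binary-search loop correctness on a sorted segment
lemma pv_bisectLoop_eq (a : List Int) (x : Int) (upper : Bool)
    (hs : a.Pairwise (· ≤ ·)) :
    ∀ (fuel : Nat) (lo hi : Int), (hi - lo).toNat ≤ fuel → 0 ≤ lo → lo ≤ hi → hi ≤ (a.length : Int) →
    (∀ (k : Nat) (hk : k < a.length), k < lo.toNat → (a[k] < x ∨ (upper = true ∧ a[k] = x))) →
    (∀ (k : Nat) (hk : k < a.length), hi.toNat ≤ k → ¬(a[k] < x ∨ (upper = true ∧ a[k] = x))) →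
    pvBisectLoop a x upper fuel lo hi
      = (a.countP (fun u => decide (u < x ∨ (upper = true ∧ u = x))) : Int) := by
  intro fuel
  induction fuel with
  | zero =>
    intro lo hi hn hlo hlh hhi hbelow habove
    have heq : lo = hi := by omega
    subst heq
    exact pv_bisect_count_at a x upper lo hlo hhi hbelow habove
  | succ fuel IH =>
    intro lo hi hn hlo hlh hhi hbelow habove
    show (if lo < hi then
        match PySem.List.pyGet? a (PySem.Int.floordiv (lo + hi) 2) with
        | none => lo
        | some v =>
          if v < x ∨ (upper = true ∧ v = x) then
            pvBisectLoop a x upper fuel (PySem.Int.floordiv (lo + hi) 2 + 1) hi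
          else
            pvBisectLoop a x upper fuel lo (PySem.Int.floordiv (lo + hi) 2)
      else lo)
      = (a.countP (fun u => decide (u < x ∨ (upper = true ∧ u = x))) : Int)
    by_cases hlt : lo < hi
    · rw [if_pos hlt]
      have hmb := PySem.Int.floordiv_two_mid_bounds (le_of_lt hlt)
      have hmlt : PySem.Int.floordiv (lo + hi) 2 < hi := by
        rw [PySem.Int.floordiv_lt_iff_lt_mul (by norm_num)]; omega
      set mid := PySem.Int.floordiv (lo + hi) 2 with hmid
      have hm0 : 0 ≤ mid := le_trans hlo hmb.1
      have hmlen : mid < (a.length : Int) := lt_of_lt_of_le hmlt hhi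
      have hmn : mid.toNat < a.length := by omega
      rw [PySem.List.pyGet?_eq_some_getElem a hm0 hmlen]
      show (if a[mid.toNat] < x ∨ (upper = true ∧ a[mid.toNat] = x) then
          pvBisectLoop a x upper fuel (mid + 1) hi else pvBisectLoop a x upper fuel lo mid)
        = (a.countP (fun u => decide (u < x ∨ (upper = true ∧ u = x))) : Int)
      by_cases hc : a[mid.toNat] < x ∨ (upper = true ∧ a[mid.toNat] = x)
      · rw [if_pos hc]
        refine IH (mid + 1) hi (by omega) (by omega) (by omega) hhi ?_ habove
        intro k hk hklt
        have hle : a[k] ≤ a[mid.toNat] := pv_sorted_getElem_le a hs k mid.toNat hmn (by omega)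
        exact pv_pred_anti x upper a[k] a[mid.toNat] hle hc
      · rw [if_neg hc]
        refine IH lo mid (by omega) hlo (by omega) (le_of_lt hmlen) hbelow ?_
        intro k hk hge
        have hle : a[mid.toNat] ≤ a[k] := pv_sorted_getElem_le a hs mid.toNat k hk (by omega)
        exact fun hp => hc (pv_pred_anti x upper a[mid.toNat] a[k] hle hp)
    · rw [if_neg hlt]
      have heq : lo = hi := le_antisymm hlh (not_lt.mp hlt)
      subst heq
      exact pv_bisect_count_at a x upper lo hlo hhi hbelow habove

-- the bisect difference is the window count (tolerance ≥ 0)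
lemma pv_bisect_window (time_sources : List (Int × Int)) (tolerance : Int) (ht : 0 ≤ tolerance)
    (t : Int) :
    pvBisect (PySem.List.sorted (time_sources.map Prod.snd) (fun u => u) false) (t + tolerance) true
      - pvBisect (PySem.List.sorted (time_sources.map Prod.snd) (fun u => u) false) (t - tolerance) false
    = ((time_sources.map Prod.snd).countP (fun u => decide (|t - u| ≤ tolerance)) : Int) := by
  set ts := PySem.List.sorted (time_sources.map Prod.snd) (fun u => u) false with hts
  have hs : ts.Pairwise (· ≤ ·) := PySem.List.sorted_pairwise (time_sources.map Prod.snd) (fun u => u)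
  have hperm : ts.Perm (time_sources.map Prod.snd) :=
    PySem.List.sorted_perm (time_sources.map Prod.snd) (fun u => u) false
  have hU : pvBisectLoop ts (t + tolerance) true ts.length 0 (ts.length : Int)
      = (ts.countP (fun u => decide (u < t + tolerance ∨ (true = true ∧ u = t + tolerance))) : Int) := by
    apply pv_bisectLoop_eq ts (t + tolerance) true hs ts.length 0 (ts.length : Int)
      (by omega) (by omega) (by omega) (by omega)
    · intro k hk hklt
      omega
    · intro k hk hge
      omega
  have hL : pvBisectLoop ts (t - tolerance) false ts.length 0 (ts.length : Int)
      = (ts.countP (fun u => decide (u < t - tolerance ∨ (false = true ∧ u = t - tolerance))) : Int) := by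
    apply pv_bisectLoop_eq ts (t - tolerance) false hs ts.length 0 (ts.length : Int)
      (by omega) (by omega) (by omega) (by omega)
    · intro k hk hklt
      omega
    · intro k hk hge
      omega
  unfold pvBisect
  rw [hU, hL]
  have hU' : ts.countP (fun u => decide (u < t + tolerance ∨ (true = true ∧ u = t + tolerance)))
      = ts.countP (fun u => decide (u ≤ t + tolerance)) := by
    apply List.countP_congr
    intro u _
    simp only [decide_eq_true_eq]
    constructor
    · rintro (h | ⟨-, h⟩) <;> omega
    · intro h
      rcases lt_or_eq_of_le h with h' | h'
      · exact Or.inl h'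
      · exact Or.inr ⟨trivial, h'⟩
  have hL' : ts.countP (fun u => decide (u < t - tolerance ∨ (false = true ∧ u = t - tolerance)))
      = ts.countP (fun u => decide (u ≤ t + tolerance) && decide (u < t - tolerance)) := by
    apply List.countP_congr
    intro u _
    simp only [Bool.and_eq_true, decide_eq_true_eq]
    constructor
    · rintro (h | ⟨h, _⟩)
      · exact ⟨by omega, h⟩
      · cases h
    · rintro ⟨_, h⟩
      exact Or.inl h
  rw [hU', hL']
  have hsub := pv_countP_and_not ts (fun u => decide (u ≤ t + tolerance))
    (fun u => decide (u < t - tolerance))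
  rw [← hsub]
  have hwin : ts.countP (fun u => decide (u ≤ t + tolerance) && !decide (u < t - tolerance))
      = ts.countP (fun u => decide (|t - u| ≤ tolerance)) := by
    apply List.countP_congr
    intro u _
    simp only [Bool.and_eq_true, Bool.not_eq_true', decide_eq_true_eq, decide_eq_false_iff_not,
      decide_eq_decide, abs_le]
    omega
  rw [hwin]
  exact_mod_cast congrArg Nat.cast (hperm.countP_eq _)

-- a fold of inserts with uniformly shifted values shifts the items pointwise
lemma pv_items_foldl_insert_shift (l : List (Int × Int)) (f : Int × Int → Int) (c : Int)
    (d d' : PySem.Dict Int Int)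
    (h : PySem.Dict.items d' = (PySem.Dict.items d).map (fun q => (q.1, q.2 - c))) :
    PySem.Dict.items (l.foldl (fun d p => d.insert p.1 (f p - c)) d')
      = (PySem.Dict.items (l.foldl (fun d p => d.insert p.1 (f p)) d)).map (fun q => (q.1, q.2 - c)) := by
  induction l generalizing d d' with
  | nil => simpa using h
  | cons p l ih =>
    simp only [List.foldl_cons]
    apply ih
    have hkeys : PySem.Dict.keys d' = PySem.Dict.keys d := by
      simp only [PySem.Dict.keys, h, List.map_map]
      rfl
    have hcont : d'.contains p.1 = d.contains p.1 := by
      rw [PySem.Dict.contains_eq_decide_mem_keys, PySem.Dict.contains_eq_decide_mem_keys, hkeys]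
    rw [PySem.Dict.items_insert, PySem.Dict.items_insert, hcont, h]
    by_cases hc : d.contains p.1 = true
    · rw [if_pos hc, if_pos hc, List.map_map, List.map_map]
      apply List.map_congr_left
      intro q _
      by_cases hq : q.1 == p.1
      · simp [Function.comp, hq]
      · simp [Function.comp, hq]
    · rw [if_neg hc, if_neg hc, List.map_append]
      rfl

-- running max commutes with a uniform shift
lemma pv_foldl_max_sub (t : List Int) (x c : Int) :
    (t.map (fun v => v - c)).foldl max (x - c) = t.foldl max x - c := by
  induction t generalizing x with
  | nil => simp
  | cons a t ih =>
    have : max (x - c) (a - c) = max x a - c := by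
      rcases le_total x a with h | h
      · rw [max_eq_right h, max_eq_right (by omega)]
      · rw [max_eq_left h, max_eq_left (by omega)]
    simpa [this] using ih (max x a)

lemma pv_max?_map_sub (l : List Int) (c : Int) :
    PySem.List.max? (l.map (fun v => v - c)) (fun v => v)
      = (PySem.List.max? l (fun v => v)).map (fun v => v - c) := by
  cases l with
  | nil => rfl
  | cons a t => simp [PySem.List.max?_id_cons, pv_foldl_max_sub]

lemma pv_foldl_enumerate_snd {β : Type} (xs : List (Int × Int)) (G : β → (Int × Int) → β)
    (init : β) :
    (PySem.List.enumerate xs 0).foldl (fun d p => G d p.2) init = xs.foldl G init := by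
  conv_rhs => rw [← PySem.List.map_snd_enumerate xs 0]
  exact List.foldl_map.symm

lemma pv_getD_zero (l : List (Int × Int)) (d : PySem.Dict Int Int) (k : Int)
    (h : d.getD k 0 = 0) :
    (l.foldl (fun d r => d.insert r.1 (0 : Int)) d).getD k 0 = 0 := by
  induction l generalizing d with
  | nil => exact h
  | cons p l ih =>
    simp only [List.foldl_cons]
    apply ih
    rw [PySem.Dict.getD_insert]
    split_ifs <;> simp [h]

lemma pv_foldl_max_zeros (L : List Int) (h : ∀ y ∈ L, y = 0) : L.foldl max 0 = 0 := by
  induction L with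
  | nil => rfl
  | cons a t ih =>
    have ha : a = 0 := h a List.mem_cons_self
    simp only [List.foldl_cons, ha, max_self]
    exact ih fun y hy => h y (List.mem_cons_of_mem _ hy)

-- ===== VERDICT (by name: the statement is the Claim_ definition above) =====
theorem select_agreement_sources_spec : Claim_equal_select_agreement_sources := by
  intro time_sources tolerance hdom hpre
  unfold Spec_select_agreement_sources
  simp only [select_agreement_sources, select_agreement_sources_alt]
  -- rewrite A's dict: inner loop = full window count minus the self term
  have hA1 : (PySem.List.enumerate time_sources 0).foldl (fun d p =>
        d.insert p.2.1 ((PySem.List.enumerate time_sources 0).foldl (fun c q =>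
          if q.1 = p.1 then c
          else if |p.2.2 - q.2.2| ≤ tolerance then c + 1 else c) (0 : Int)))
        PySem.Dict.empty
      = (PySem.List.enumerate time_sources 0).foldl (fun d p =>
        d.insert p.2.1 (((time_sources.map Prod.snd).countP
            (fun u => decide (|p.2.2 - u| ≤ tolerance)) : Int)
          - (if 0 ≤ tolerance then 1 else 0))) PySem.Dict.empty := by
    apply PySem.List.foldl_congr_mem
    intro acc p hp
    rw [pv_inner_loop time_sources tolerance p hp]
  have hA2 : (PySem.List.enumerate time_sources 0).foldl (fun d p =>
        d.insert p.2.1 (((time_sources.map Prod.snd).countP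
            (fun u => decide (|p.2.2 - u| ≤ tolerance)) : Int)
          - (if 0 ≤ tolerance then 1 else 0))) PySem.Dict.empty
      = time_sources.foldl (fun d r =>
        d.insert r.1 (((time_sources.map Prod.snd).countP
            (fun u => decide (|r.2 - u| ≤ tolerance)) : Int)
          - (if 0 ≤ tolerance then 1 else 0))) PySem.Dict.empty :=
    pv_foldl_enumerate_snd time_sources (fun d r =>
      d.insert r.1 (((time_sources.map Prod.snd).countP
          (fun u => decide (|r.2 - u| ≤ tolerance)) : Int)
        - (if 0 ≤ tolerance then 1 else 0))) PySem.Dict.empty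
  rw [hA1, hA2]
  by_cases ht : tolerance < 0
  · -- negative tolerance: every window count is 0, everything ties
    rw [if_pos ht]
    have hzero : ∀ r : Int × Int, ((time_sources.map Prod.snd).countP
          (fun u => decide (|r.2 - u| ≤ tolerance)) : Int)
        - (if 0 ≤ tolerance then 1 else 0) = 0 := by
      intro r
      have h1 : (time_sources.map Prod.snd).countP (fun u => decide (|r.2 - u| ≤ tolerance)) = 0 := by
        rw [List.countP_eq_zero]
        intro u _
        simp only [decide_eq_true_eq]
        have := abs_nonneg (r.2 - u)
        omega
      rw [h1, if_neg (by omega)]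
      simp
    have hfold : time_sources.foldl (fun d r =>
          d.insert r.1 (((time_sources.map Prod.snd).countP
              (fun u => decide (|r.2 - u| ≤ tolerance)) : Int)
            - (if 0 ≤ tolerance then 1 else 0))) PySem.Dict.empty
        = time_sources.foldl (fun d r => d.insert r.1 (0 : Int)) PySem.Dict.empty := by
      apply PySem.List.foldl_congr_mem
      intro acc r _
      rw [hzero r]
    rw [hfold]
    set D := time_sources.foldl (fun d r => d.insert r.1 (0 : Int)) PySem.Dict.empty with hD
    have hkeys : D.keys = PySem.Set.ofList (time_sources.map (fun r : Int × Int => r.1)) := by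
      have h1 : D.keys = PySem.Set.update (PySem.Dict.empty : PySem.Dict Int Int).keys
          (time_sources.map (fun r : Int × Int => r.1)) :=
        PySem.Dict.keys_foldl_insert_key time_sources (fun r : Int × Int => r.1)
          (fun _ _ => (0 : Int)) PySem.Dict.empty
      rw [h1, PySem.Dict.keys_empty, PySem.Set.update_nil_left]
    have hnd : D.keys.Nodup :=
      PySem.Dict.nodup_keys_foldl_insert_key time_sources (fun r : Int × Int => r.1)
        (fun _ _ => (0 : Int)) PySem.Dict.empty PySem.Dict.nodup_keys_empty
    have hitems : D.items = D.keys.map (fun k => (k, (0 : Int))) := by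
      rw [PySem.Dict.items_eq_map_keys D hnd 0]
      apply List.map_congr_left
      intro k _
      have : D.getD k 0 = 0 := pv_getD_zero time_sources PySem.Dict.empty k (by simp [pysem])
      rw [this]
    have hKne : D.keys ≠ [] := by
      cases hts : time_sources with
      | nil => exact absurd hts hpre
      | cons r rest =>
        intro hKnil
        have : r.1 ∈ D.keys := by
          rw [hkeys, hts]
          exact (PySem.Set.mem_ofList _ _).mpr (by simp)
        rw [hKnil] at this
        cases this
    obtain ⟨k0, K, hK⟩ := List.exists_cons_of_ne_nil hKne
    have hvals : PySem.Dict.values D = (0 : Int) :: K.map (fun _ => (0 : Int)) := by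
      simp only [PySem.Dict.values, hitems, hK, List.map_cons, List.map_map]
      rfl
    rw [hvals, PySem.List.max?_id_cons]
    have hmax0 : (K.map (fun _ => (0 : Int))).foldl max 0 = 0 := by
      apply pv_foldl_max_zeros
      intro y hy
      obtain ⟨_, _, rfl⟩ := List.mem_map.mp hy
      rfl
    rw [hmax0]
    show (D.items.filter (fun kv => decide (kv.2 = (0 : Int)))).map Prod.fst
      = PySem.List.dedup (time_sources.map Prod.fst)
    have hfilter : (PySem.Dict.items D).filter (fun kv => decide (kv.2 = (0 : Int))) = D.items := by
      apply List.filter_eq_self.mpr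
      intro q hq
      rw [hitems] at hq
      obtain ⟨k, _, rfl⟩ := List.mem_map.mp hq
      simp
    rw [hfilter, hitems, List.map_map]
    have : (Prod.fst ∘ fun k : Int => (k, (0 : Int))) = id := by
      funext k
      rfl
    rw [this, List.map_id, hkeys]
    simp [pysem]
  · -- tolerance ≥ 0: B's window count is A's count plus the self term 1
    rw [if_neg ht]
    have ht' : 0 ≤ tolerance := by omega
    set dA := time_sources.foldl (fun d r =>
        d.insert r.1 (((time_sources.map Prod.snd).countP
            (fun u => decide (|r.2 - u| ≤ tolerance)) : Int)
          - (if 0 ≤ tolerance then 1 else 0))) PySem.Dict.empty with hdA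
    have hB : time_sources.foldl (fun d p =>
          d.insert p.1 (pvBisect (PySem.List.sorted (time_sources.map Prod.snd) (fun t => t) false)
              (p.2 + tolerance) true
            - pvBisect (PySem.List.sorted (time_sources.map Prod.snd) (fun t => t) false)
              (p.2 - tolerance) false)) PySem.Dict.empty
        = time_sources.foldl (fun d r =>
          d.insert r.1 (((time_sources.map Prod.snd).countP
              (fun u => decide (|r.2 - u| ≤ tolerance)) : Int))) PySem.Dict.empty := by
      apply PySem.List.foldl_congr_mem
      intro acc r _
      rw [pv_bisect_window time_sources tolerance ht' r.2]
    rw [hB]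
    set dB := time_sources.foldl (fun d r =>
        d.insert r.1 (((time_sources.map Prod.snd).countP
            (fun u => decide (|r.2 - u| ≤ tolerance)) : Int))) PySem.Dict.empty with hdB
    have hitems : PySem.Dict.items dA
        = (PySem.Dict.items dB).map (fun q => (q.1, q.2 - 1)) := by
      rw [hdA]
      have hbody : time_sources.foldl (fun d r =>
            d.insert r.1 (((time_sources.map Prod.snd).countP
                (fun u => decide (|r.2 - u| ≤ tolerance)) : Int)
              - (if 0 ≤ tolerance then 1 else 0))) PySem.Dict.empty
          = time_sources.foldl (fun d r =>
            d.insert r.1 (((time_sources.map Prod.snd).countP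
                (fun u => decide (|r.2 - u| ≤ tolerance)) : Int) - 1)) PySem.Dict.empty := by
        apply PySem.List.foldl_congr_mem
        intro acc r _
        rw [if_pos ht']
      rw [hbody]
      exact pv_items_foldl_insert_shift time_sources
        (fun r => ((time_sources.map Prod.snd).countP
          (fun u => decide (|r.2 - u| ≤ tolerance)) : Int)) 1
        PySem.Dict.empty PySem.Dict.empty (by rfl)
    have hvals : PySem.Dict.values dA
        = (PySem.Dict.values dB).map (fun v => v - 1) := by
      simp only [PySem.Dict.values, hitems, List.map_map]
      rfl
    rw [hvals, pv_max?_map_sub]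
    cases hmax : PySem.List.max? (PySem.Dict.values dB) (fun v => v) with
    | none => rfl
    | some best =>
      simp only [Option.map_some]
      show ((PySem.Dict.items dA).filter (fun kv => decide (kv.2 = best - 1))).map Prod.fst
        = ((PySem.Dict.items dB).filter (fun kv => decide (kv.2 = best))).map Prod.fst
      rw [hitems, List.filter_map, List.map_map]
      have hpred : ((fun kv : Int × Int => decide (kv.2 = best - 1)) ∘
            (fun q : Int × Int => (q.1, q.2 - 1)))
          = fun kv : Int × Int => decide (kv.2 = best) := by
        funext q
        simp only [Function.comp]
        exact decide_eq_decide.mpr (by omega)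
      rw [hpred]
      rfl
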